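-- pv_equiv track=rewrite | github.com/annmonrajijames/can_diagnostic_tool | CAN_tools/csselectronicsDBC_to_cantoolsDBC.py | vector_bits
-- ===== SOURCE A (Python) =====
-- from typing import Dict, Iterable, List, Tuple
--
-- def vector_bits(start: int, length: int, byte_order: str) -> List[int]:
--     """Return exact bit indices as per Vector numbering."""
--     if str(byte_order).lower().startswith('l'):  # Intel / little-endian
--         return list(range(start, start + length))
--     # Motorola / big-endian: descending bits per byte, jump +8 at byte end
--     bits: List[int] = []
--     for i in range(length):
--         byte_jump = i // 8
--         bit = start + 8 * byte_jump - (i % 8)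
--         bits.append(bit)
--     return bits
-- ===== SOURCE B (Python) =====
-- from typing import List
--
-- def vector_bits(start: int, length: int, byte_order: str) -> List[int]:
--     """Return exact bit indices as per Vector numbering."""
--     if str(byte_order).lower().startswith('l'):  # Intel / little-endian
--         return list(range(start, start + length))
--     # Motorola / big-endian: successor recurrence, no index arithmetic.
--     # Walk a running bit value: within a byte it decreases by 1; when the
--     # byte's 8 bits are exhausted it jumps +15 to the top of the next byte.
--     bits: List[int] = []
--     bit = start
--     remaining = 8  # bits left in the current byte
--     for _ in range(length):
--         bits.append(bit)
--         remaining -= 1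
--         if remaining == 0:
--             bit += 15
--             remaining = 8
--         else:
--             bit -= 1
--     return bits
-- ===== Notes on version B (the rewrite author's own statement) =====
-- stated objective: alternative
-- what changed: The big-endian branch no longer computes each bit from its index via i//8 and i%8; B maintains a running bit value as a successor recurrence (decrement within a byte, jump +15 at a byte boundary, tracked by a bits-remaining counter), appending the current state each step.
import Mathlib
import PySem

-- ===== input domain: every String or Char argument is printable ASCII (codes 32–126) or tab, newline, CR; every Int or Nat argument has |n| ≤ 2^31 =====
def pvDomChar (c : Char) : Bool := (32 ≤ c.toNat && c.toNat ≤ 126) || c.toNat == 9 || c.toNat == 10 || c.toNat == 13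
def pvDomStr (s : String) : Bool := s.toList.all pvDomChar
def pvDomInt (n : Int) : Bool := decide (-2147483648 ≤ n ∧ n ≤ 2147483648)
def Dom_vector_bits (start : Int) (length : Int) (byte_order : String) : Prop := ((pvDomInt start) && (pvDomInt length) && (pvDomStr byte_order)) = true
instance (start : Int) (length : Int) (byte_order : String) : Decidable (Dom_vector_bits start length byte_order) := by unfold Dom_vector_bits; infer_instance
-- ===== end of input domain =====

-- B's big-endian branch replaces per-index //8 and %8 arithmetic with a stateful
-- successor recurrence on a running bit value (objective: alternative decomposition).

-- ===== PORT A =====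
def vector_bits (start : Int) (length : Int) (byte_order : String) : List Int :=
  if PySem.Str.startswith (PySem.Str.lower byte_order) "l" then
    PySem.List.pyRange start (start + length) 1
  else
    (PySem.List.pyRange 0 length 1).foldl
      (fun bits i => bits ++ [start + 8 * PySem.Int.floordiv i 8 - PySem.Int.mod i 8]) []

-- ===== PORT B =====
-- one loop iteration of B's big-endian recurrence on the state (bits, bit, remaining)
def vbStep (st : List Int × Int × Int) : List Int × Int × Int :=
  let bits := st.1 ++ [st.2.1]
  let remaining := st.2.2 - 1
  if remaining = 0 then (bits, st.2.1 + 15, 8) else (bits, st.2.1 - 1, remaining)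

def vector_bits_alt (start : Int) (length : Int) (byte_order : String) : List Int :=
  if PySem.Str.startswith (PySem.Str.lower byte_order) "l" then
    PySem.List.pyRange start (start + length) 1
  else
    ((PySem.List.pyRange 0 length 1).foldl (fun st _ => vbStep st) ([], start, 8)).1

-- ===== PRECONDITION & SPEC =====
def Spec_vector_bits (start : Int) (length : Int) (byte_order : String) (out : List Int) : Prop := out = vector_bits_alt start length byte_order
instance (start : Int) (length : Int) (byte_order : String) (out : List Int) : Decidable (Spec_vector_bits start length byte_order out) := by unfold Spec_vector_bits; infer_instance

-- ===== CLAIM (what is proved, stated in full; the proofs are below) =====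
def Claim_equal_vector_bits : Prop := ∀ (start : Int) (length : Int) (byte_order : String), Dom_vector_bits start length byte_order → Spec_vector_bits start length byte_order (vector_bits start length byte_order)

-- ===== LEMMAS AND PROOFS =====

-- the intended value at Nat index k
def pvGold (start : Int) (k : Nat) : Int := start + 8 * ((k / 8 : Nat) : Int) - ((k % 8 : Nat) : Int)

-- a fold appending one element per item is a map
theorem pv_foldl_append {α β : Type} (f : α → β) (l : List α) (init : List β) :
    l.foldl (fun acc x => acc ++ [f x]) init = init ++ l.map f := by
  induction l generalizing init with
  | nil => simp
  | cons x xs ih => simp [List.foldl, ih, List.append_assoc]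

-- A's big-endian fold is the gold map
theorem pvA_big (start length : Int) :
    (PySem.List.pyRange 0 length 1).foldl
      (fun bits i => bits ++ [start + 8 * PySem.Int.floordiv i 8 - PySem.Int.mod i 8]) []
      = (List.range length.toNat).map (pvGold start) := by
  rw [PySem.List.pyRange_one, pv_foldl_append]
  simp [List.map_map, Function.comp, pvGold]

-- B's loop invariant: after n iterations the state is
-- (gold prefix, gold value at index n, bits remaining in the current byte)
theorem pvB_fold (start : Int) (n : Nat) :
    (PySem.List.pyRange 0 (n : Int) 1).foldl (fun st _ => vbStep st) ([], start, 8)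
      = ((List.range n).map (pvGold start), pvGold start n, 8 - ((n % 8 : Nat) : Int)) := by
  induction n with
  | zero =>
    rw [PySem.List.pyRange_one_eq_nil (by omega)]
    simp [pvGold]
  | succ n ih =>
    have hsplit : PySem.List.pyRange 0 ((n : Int) + 1) 1
        = PySem.List.pyRange 0 (n : Int) 1 ++ [(n : Int)] := by
      exact PySem.List.pyRange_one_succ_right (by omega)
    push_cast
    rw [hsplit, List.foldl_append, ih]
    simp only [List.foldl, vbStep]
    have hgold : (List.range n).map (pvGold start) ++ [pvGold start n]
        = (List.range (n + 1)).map (pvGold start) := by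
      simp [List.range_succ]
    by_cases hlast : n % 8 = 7
    · have h0 : (8 : Int) - ((n % 8 : Nat) : Int) - 1 = 0 := by
        rw [hlast]; norm_num
      rw [if_pos h0]
      refine Prod.ext hgold (Prod.ext ?_ ?_)
      · show pvGold start n + 15 = pvGold start (n + 1)
        unfold pvGold
        have h1 : (n + 1) / 8 = n / 8 + 1 := by omega
        have h2 : (n + 1) % 8 = 0 := by omega
        rw [h1, h2]; push_cast [hlast]; ring
      · show (8 : Int) = 8 - (((n + 1) % 8 : Nat) : Int)
        have h2 : (n + 1) % 8 = 0 := by omega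
        rw [h2]; norm_num
    · have hlt : n % 8 < 7 := by omega
      have h0 : ¬ ((8 : Int) - ((n % 8 : Nat) : Int) - 1 = 0) := by
        have : ((n % 8 : Nat) : Int) < 7 := by exact_mod_cast hlt
        omega
      rw [if_neg h0]
      refine Prod.ext hgold (Prod.ext ?_ ?_)
      · show pvGold start n - 1 = pvGold start (n + 1)
        unfold pvGold
        have h1 : (n + 1) / 8 = n / 8 := by omega
        have h2 : (n + 1) % 8 = n % 8 + 1 := by omega
        rw [h1, h2]; push_cast; ring
      · show (8 : Int) - ((n % 8 : Nat) : Int) - 1 = 8 - (((n + 1) % 8 : Nat) : Int)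
        have h2 : (n + 1) % 8 = n % 8 + 1 := by omega
        rw [h2]; push_cast; ring

-- ===== VERDICT (by name: the statement is the Claim_ definition above) =====
theorem vector_bits_spec : Claim_equal_vector_bits := by
  intro start length byte_order _
  unfold Spec_vector_bits vector_bits vector_bits_alt
  by_cases h : PySem.Str.startswith (PySem.Str.lower byte_order) "l" = true
  · rw [if_pos h, if_pos h]
  · rw [if_neg h, if_neg h]
    by_cases hpos : 0 ≤ length
    · have hcast : length = ((length.toNat : Nat) : Int) := by omega
      rw [pvA_big, hcast, pvB_fold]
      have : (max length 0).toNat = length.toNat := by omega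
      simp [this]
    · have hA : PySem.List.pyRange 0 length 1 = [] :=
        PySem.List.pyRange_one_eq_nil (by omega)
      rw [hA]
      simp
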